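-- pv_equiv track=rewrite | github.com/Ventmaster/GFGPoTD | 14 Mar 24 - Largest subsquare surrounded by X.py | largestSubsquare
-- ===== SOURCE A (Python) =====
-- def largestSubsquare(n, a):
--     #code here
--     r, c = len(a), len(a[0])
--     dp = [[[0,0] for _ in range(r+1)]for _ in range(c+1)]
--
--     for i in range(r):
--         for j in range(c):
--             if a[i][j] == 'X':
--                 dp[i+1][j+1][0] = 1 + dp[i][j+1][0]
--                 dp[i+1][j+1][1] = 1 + dp[i+1][j][1]
--
--     maximum = 0
--
--     for i in range(r, 0, -1):
--         for j in range(c, 0, -1):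
--             minimum = min(dp[i][j][0], dp[i][j][1])
--
--             while minimum > maximum:
--                 if dp[i-minimum+1][j][1] >= minimum and dp[i][j-minimum+1][0] >= minimum:
--                     maximum = minimum
--                 else:
--                     minimum -= 1
--
--     return maximum
-- ===== SOURCE B (Python) =====
-- def largestSubsquare(n, a):
--     # Simpler: directly scan the four borders of every candidate square, keep the last (largest) side that works.
--     if not a:
--         return 0
--     r, c = len(a), len(a[0])
--     def X(i, j):
--         return a[i][j] == 'X'
--     best = 0
--     for k in range(1, min(r, c) + 1):
--         for i in range(r - k + 1):
--             for j in range(c - k + 1):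
--                 if (all(X(i, j + t) for t in range(k))
--                         and all(X(i + k - 1, j + t) for t in range(k))
--                         and all(X(i + t, j) for t in range(k))
--                         and all(X(i + t, j + k - 1) for t in range(k))):
--                     best = k
--     return best
-- ===== Notes on version B (the rewrite author's own statement) =====
-- stated objective: simpler
-- what changed: Replaced the run-length DP tables plus corner-wise decrement-and-prune while loop by a direct triple loop over candidate squares that scans the four borders character by character and keeps the last (largest) valid side.
import Mathlib
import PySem

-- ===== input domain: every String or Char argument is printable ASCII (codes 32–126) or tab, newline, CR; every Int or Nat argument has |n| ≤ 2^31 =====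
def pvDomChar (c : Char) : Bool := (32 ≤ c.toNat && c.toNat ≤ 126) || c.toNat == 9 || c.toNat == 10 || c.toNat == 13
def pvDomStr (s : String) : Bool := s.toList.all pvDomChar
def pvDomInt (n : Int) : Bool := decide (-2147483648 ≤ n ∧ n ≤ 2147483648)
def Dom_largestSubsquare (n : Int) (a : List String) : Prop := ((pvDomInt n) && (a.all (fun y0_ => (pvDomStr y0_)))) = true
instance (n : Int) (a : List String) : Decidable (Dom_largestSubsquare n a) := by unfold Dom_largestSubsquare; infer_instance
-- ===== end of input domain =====

-- B is a simpler re-implementation: no DP tables, just a direct scan of the four borders of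
-- every candidate square.  Equivalence is claimed on the return value only (A mutates nothing).

-- ===== PORT A =====
-- a[i][j] == 'X' (exact for in-range indices; Pre_ keeps every access in range)
def pvX (a : List String) (i j : Nat) : Bool := ((a.getD i "").toList.getD j ' ') == 'X'

-- the body of A's first double loop: one assignment pass at cell (i, j)
def pvDpStep (a : List String) (i j : Nat) (dp : Nat → Nat → Int × Int) : Nat → Nat → Int × Int :=
  if pvX a i j then
    (fun x y => if x = i + 1 ∧ y = j + 1 then (1 + (dp i (j + 1)).1, 1 + (dp (i + 1) j).2) else dp x y)
  else dp

-- A's dp table after the first double loop (table kept as a function, updated pointwise)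
def pvDpTable (a : List String) (r c : Nat) : Nat → Nat → Int × Int :=
  (List.range r).foldl (fun dp i => (List.range c).foldl (fun dp j => pvDpStep a i j dp) dp)
    (fun _ _ => (0, 0))

-- range(m, 0, -1) = [m, m-1, …, 1]
def pvDesc (m : Nat) : List Nat := (List.range m).map (fun t => m - t)

-- A's inner while loop (indices i, j are the 1-based indices of the Python loop)
def pvWhile (dp : Nat → Nat → Int × Int) (i j : Nat) (minimum maximum : Int) : Int :=
  if minimum > maximum then
    if (dp (i - minimum.toNat + 1) j).2 ≥ minimum ∧ (dp i (j - minimum.toNat + 1)).1 ≥ minimum then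
      minimum
    else pvWhile dp i j (minimum - 1) maximum
  else maximum
termination_by (minimum - maximum).toNat
decreasing_by omega

def largestSubsquare (n : Int) (a : List String) : Int :=
  let r := a.length
  let c := (a.headD "").length
  let dp := pvDpTable a r c
  (pvDesc r).foldl (fun maximum i =>
    (pvDesc c).foldl (fun maximum j =>
      pvWhile dp i j (min (dp i j).1 (dp i j).2) maximum) maximum) 0

-- ===== PORT B =====
-- the four generator `all(...)` border scans of Source B, top-left corner (i, j), side k
def pvBorder (a : List String) (i j k : Nat) : Bool :=
  ((List.range k).all fun t => pvX a i (j + t)) &&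
  ((List.range k).all fun t => pvX a (i + k - 1) (j + t)) &&
  ((List.range k).all fun t => pvX a (i + t) j) &&
  ((List.range k).all fun t => pvX a (i + t) (j + k - 1))

def largestSubsquare_alt (n : Int) (a : List String) : Int :=
  if a = [] then 0
  else
    let r := a.length
    let c := (a.headD "").length
    (List.range (min r c)).foldl (fun best k0 =>
      let k := k0 + 1
      (List.range (r - k + 1)).foldl (fun best i =>
        (List.range (c - k + 1)).foldl (fun best j =>
          if pvBorder a i j k then (k : Int) else best) best) best) 0

-- ===== PRECONDITION & SPEC =====
-- Pre_ excludes exactly the inputs on which Python A raises IndexError: the empty list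
-- (a[0]), and — since dp is (mis)sized (c+1)×(r+1), so the second loop reads dp[r][c] —
-- non-square grids or grids with a row shorter than the first row, whenever c > 0.
def Pre_largestSubsquare (n : Int) (a : List String) : Prop :=
  a ≠ [] ∧
    ((a.headD "").length = 0 ∨
      ((a.headD "").length = a.length ∧ ∀ s ∈ a, (a.headD "").length ≤ s.length))
instance (n : Int) (a : List String) : Decidable (Pre_largestSubsquare n a) := by
  unfold Pre_largestSubsquare; infer_instance

def pvWitness_largestSubsquare : Int × List String := (0, ["XX", "XX"])

def Spec_largestSubsquare (n : Int) (a : List String) (out : Int) : Prop := out = largestSubsquare_alt n a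
instance (n : Int) (a : List String) (out : Int) : Decidable (Spec_largestSubsquare n a out) := by unfold Spec_largestSubsquare; infer_instance

-- ===== CLAIM (what is proved, stated in full; the proofs are below) =====
def Claim_equal_largestSubsquare : Prop := ∀ (n : Int) (a : List String), Dom_largestSubsquare n a → Pre_largestSubsquare n a → Spec_largestSubsquare n a (largestSubsquare n a)

-- ===== LEMMAS AND PROOFS =====

-- length of the maximal run of 'X's in column j ending at row i (A's dp[i+1][j+1][0])
def vrun (a : List String) (j : Nat) : Nat → Nat
  | 0 => if pvX a 0 j then 1 else 0
  | (i + 1) => if pvX a (i + 1) j then vrun a j i + 1 else 0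

-- length of the maximal run of 'X's in row i ending at column j (A's dp[i+1][j+1][1])
def hrun (a : List String) (i : Nat) : Nat → Nat
  | 0 => if pvX a i 0 then 1 else 0
  | (j + 1) => if pvX a i (j + 1) then hrun a i j + 1 else 0

-- dp after filling rows 0..m-1 (columns 0..c-1), as a pure table
def dpSpec (a : List String) (m c : Nat) (x y : Nat) : Int × Int :=
  if 1 ≤ x ∧ x ≤ m ∧ 1 ≤ y ∧ y ≤ c then ((vrun a (y - 1) (x - 1) : Int), (hrun a (x - 1) (y - 1) : Int))
  else (0, 0)

-- an X-bordered k×k square with bottom-right grid corner (p, q)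
def goodBR (a : List String) (p q k : Nat) : Prop :=
  1 ≤ k ∧ k ≤ vrun a q p ∧ k ≤ hrun a p q ∧ k ≤ vrun a (q - (k - 1)) p ∧ k ≤ hrun a (p - (k - 1)) q
def GoodSq (a : List String) (r c k : Nat) : Prop := ∃ p, p < r ∧ ∃ q, q < c ∧ goodBR a p q k

-- "ans is the size of the largest X-bordered square (0 if none)"
def IsAns (a : List String) (r c : Nat) (ans : Int) : Prop :=
  0 ≤ ans ∧ (ans = 0 ∨ GoodSq a r c ans.toNat) ∧ ∀ k : Nat, GoodSq a r c k → (k : Int) ≤ ans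

theorem IsAns_unique (a : List String) (r c : Nat) (x y : Int)
    (hx : IsAns a r c x) (hy : IsAns a r c y) : x = y := by
  obtain ⟨hx0, hxg, hxu⟩ := hx
  obtain ⟨hy0, hyg, hyu⟩ := hy
  rcases hxg with h | h
  · rcases hyg with h' | h'
    · omega
    · have := hxu _ h'; omega
  · have hx' := hyu _ h
    rcases hyg with h' | h'
    · omega
    · have hy' := hxu _ h'
      omega

theorem mem_pvDesc (m x : Nat) : x ∈ pvDesc m ↔ 1 ≤ x ∧ x ≤ m := by
  simp only [pvDesc, List.mem_map, List.mem_range]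
  constructor
  · rintro ⟨t, ht, rfl⟩; omega
  · rintro ⟨h1, h2⟩; exact ⟨m - x, by omega, by omega⟩

theorem vrun_le (a : List String) (j i : Nat) : vrun a j i ≤ i + 1 := by
  induction i with
  | zero => simp [vrun]; split <;> omega
  | succ i ih => simp [vrun]; split <;> omega

theorem hrun_le (a : List String) (i j : Nat) : hrun a i j ≤ j + 1 := by
  induction j with
  | zero => simp [hrun]; split <;> omega
  | succ j ih => simp [hrun]; split <;> omega

theorem vrun_iff (a : List String) (j i k : Nat) :
    k ≤ vrun a j i ↔ (k ≤ i + 1 ∧ ∀ t, t < k → pvX a (i - t) j = true) := by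
  induction i generalizing k with
  | zero =>
    have e : ∀ t : Nat, 0 - t = 0 := fun t => Nat.zero_sub t
    by_cases h : pvX a 0 j
    · simp only [vrun, h, if_true]
      constructor
      · intro hk; exact ⟨hk, fun t _ => by rw [e]; exact h⟩
      · exact fun ⟨h1, _⟩ => h1
    · simp only [vrun, h, Bool.false_eq_true, if_false, Nat.le_zero]
      constructor
      · rintro rfl; exact ⟨by omega, fun t ht => absurd ht (Nat.not_lt_zero t)⟩
      · rintro ⟨h1, h2⟩
        by_contra hk
        have := h2 0 (by omega)
        rw [e] at this
        exact h this
  | succ i ih =>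
    by_cases h : pvX a (i + 1) j
    · simp only [vrun, h, if_true]
      cases k with
      | zero => simp
      | succ k' =>
        constructor
        · intro hk
          obtain ⟨h1, h2⟩ := (ih k').mp (by omega)
          refine ⟨by omega, ?_⟩
          intro t ht
          cases t with
          | zero => simpa using h
          | succ s =>
            have e : i + 1 - (s + 1) = i - s := by omega
            rw [e]; exact h2 s (by omega)
        · rintro ⟨h1, h2⟩
          have hk' : k' ≤ vrun a j i := by
            apply (ih k').mpr
            refine ⟨by omega, ?_⟩
            intro t ht
            have := h2 (t + 1) (by omega)
            have e : i + 1 - (t + 1) = i - t := by omega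
            rwa [e] at this
          omega
    · simp only [vrun, h, Bool.false_eq_true, if_false, Nat.le_zero]
      constructor
      · rintro rfl; exact ⟨by omega, fun t ht => absurd ht (by omega)⟩
      · rintro ⟨h1, h2⟩
        by_contra hk
        have := h2 0 (by omega)
        simp at this
        exact h this

theorem hrun_iff (a : List String) (i j k : Nat) :
    k ≤ hrun a i j ↔ (k ≤ j + 1 ∧ ∀ t, t < k → pvX a i (j - t) = true) := by
  induction j generalizing k with
  | zero =>
    have e : ∀ t : Nat, 0 - t = 0 := fun t => Nat.zero_sub t
    by_cases h : pvX a i 0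
    · simp only [hrun, h, if_true]
      constructor
      · intro hk; exact ⟨hk, fun t _ => by rw [e]; exact h⟩
      · exact fun ⟨h1, _⟩ => h1
    · simp only [hrun, h, Bool.false_eq_true, if_false, Nat.le_zero]
      constructor
      · rintro rfl; exact ⟨by omega, fun t ht => absurd ht (Nat.not_lt_zero t)⟩
      · rintro ⟨h1, h2⟩
        by_contra hk
        have := h2 0 (by omega)
        rw [e] at this
        exact h this
  | succ j ih =>
    by_cases h : pvX a i (j + 1)
    · simp only [hrun, h, if_true]
      cases k with
      | zero => simp
      | succ k' =>
        constructor
        · intro hk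
          obtain ⟨h1, h2⟩ := (ih k').mp (by omega)
          refine ⟨by omega, ?_⟩
          intro t ht
          cases t with
          | zero => simpa using h
          | succ s =>
            have e : j + 1 - (s + 1) = j - s := by omega
            rw [e]; exact h2 s (by omega)
        · rintro ⟨h1, h2⟩
          have hk' : k' ≤ hrun a i j := by
            apply (ih k').mpr
            refine ⟨by omega, ?_⟩
            intro t ht
            have := h2 (t + 1) (by omega)
            have e : j + 1 - (t + 1) = j - t := by omega
            rwa [e] at this
          omega
    · simp only [hrun, h, Bool.false_eq_true, if_false, Nat.le_zero]
      constructor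
      · rintro rfl; exact ⟨by omega, fun t ht => absurd ht (by omega)⟩
      · rintro ⟨h1, h2⟩
        by_contra hk
        have := h2 0 (by omega)
        simp at this
        exact h this

theorem vrun_eq_zero (a : List String) (j i : Nat) (h : ¬ pvX a i j = true) : vrun a j i = 0 := by
  cases i <;> simp [vrun, h]

theorem hrun_eq_zero (a : List String) (i j : Nat) (h : ¬ pvX a i j = true) : hrun a i j = 0 := by
  cases j <;> simp [hrun, h]

theorem center1 (a : List String) (i p c0 : Nat) (hX : pvX a i p = true) (hpc : p + 1 ≤ c0) :
    (vrun a p i : Int) = 1 + (dpSpec a i c0 i (p + 1)).1 := by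
  cases i with
  | zero =>
    simp only [dpSpec]
    rw [if_neg (by omega)]
    simp [vrun, hX]
  | succ m =>
    simp only [dpSpec]
    rw [if_pos ⟨by omega, by omega, by omega, by omega⟩]
    simp only [Nat.add_sub_cancel]
    simp [vrun, hX]
    ring

theorem center2 (a : List String) (i p c0 : Nat) (hX : pvX a i p = true) :
    (hrun a i p : Int) =
      1 + (if (i + 1) = i + 1 ∧ 1 ≤ p ∧ p ≤ p then ((vrun a (p - 1) i : Int), (hrun a i (p - 1) : Int))
           else dpSpec a i c0 (i + 1) p).2 := by
  cases p with
  | zero =>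
    rw [if_neg (by omega)]
    simp only [dpSpec]
    rw [if_neg (by omega)]
    simp [hrun, hX]
  | succ s =>
    rw [if_pos ⟨rfl, by omega, le_refl _⟩]
    simp only [Nat.add_sub_cancel]
    simp [hrun, hX]
    ring

theorem pvDpStep_apply (a : List String) (i j : Nat) (dp : Nat → Nat → Int × Int) (x y : Nat) :
    pvDpStep a i j dp x y =
      if pvX a i j then
        (if x = i + 1 ∧ y = j + 1 then (1 + (dp i (j + 1)).1, 1 + (dp (i + 1) j).2) else dp x y)
      else dp x y := by
  unfold pvDpStep; split <;> rfl

theorem pvRow_fold (a : List String) (i c0 : Nat) (p : Nat) (hp : p ≤ c0) :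
    ∀ x y,
      ((List.range p).foldl (fun dp j => pvDpStep a i j dp) (fun x y => dpSpec a i c0 x y)) x y =
      if x = i + 1 ∧ 1 ≤ y ∧ y ≤ p then ((vrun a (y - 1) i : Int), (hrun a i (y - 1) : Int))
      else dpSpec a i c0 x y := by
  induction p with
  | zero =>
    intro x y
    simp only [List.range_zero, List.foldl_nil]
    rw [if_neg (by omega)]
  | succ p ih =>
    intro x y
    rw [List.range_succ]
    have hfold := ih (by omega)
    rw [show List.foldl (fun dp j => pvDpStep a i j dp) (fun x y => dpSpec a i c0 x y) (List.range p ++ [p]) x y = pvDpStep a i p (List.foldl (fun dp j => pvDpStep a i j dp) (fun x y => dpSpec a i c0 x y) (List.range p)) x y from by rw [List.foldl_append, List.foldl_cons, List.foldl_nil], pvDpStep_apply]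
    by_cases hX : pvX a i p
    · rw [if_pos hX]
      by_cases hxy : x = i + 1 ∧ y = p + 1
      · rcases hxy with ⟨rfl, rfl⟩
        rw [if_pos ⟨rfl, rfl⟩, if_pos ⟨rfl, by omega, by omega⟩]
        rw [hfold i (p + 1), hfold (i + 1) p,
          if_neg (show ¬(i = i + 1 ∧ 1 ≤ p + 1 ∧ p + 1 ≤ p) by omega)]
        have e : p + 1 - 1 = p := by omega
        rw [e]
        rw [center1 a i p c0 hX hp, center2 a i p c0 hX]
      · rw [if_neg hxy, hfold x y]
        by_cases hc : x = i + 1 ∧ 1 ≤ y ∧ y ≤ p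
        · rw [if_pos hc, if_pos ⟨hc.1, hc.2.1, by omega⟩]
        · have hnc : ¬(x = i + 1 ∧ 1 ≤ y ∧ y ≤ p + 1) := by
            rintro ⟨h1, h2, h3⟩
            have : y ≠ p + 1 := fun he => hxy ⟨h1, he⟩
            exact hc ⟨h1, h2, by omega⟩
          rw [if_neg hnc, if_neg hc]
    · rw [if_neg hX, hfold x y]
      by_cases hc : x = i + 1 ∧ 1 ≤ y ∧ y ≤ p
      · rw [if_pos hc, if_pos ⟨hc.1, hc.2.1, by omega⟩]
      · by_cases hxy : x = i + 1 ∧ y = p + 1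
        · rcases hxy with ⟨rfl, rfl⟩
          rw [if_neg hc]
          simp only [dpSpec]
          rw [if_neg (show ¬(1 ≤ i + 1 ∧ i + 1 ≤ i ∧ 1 ≤ p + 1 ∧ p + 1 ≤ c0) by omega)]
          rw [if_pos (by refine ⟨by trivial, by omega, by omega⟩)]
          have e : p + 1 - 1 = p := by omega
          rw [e, vrun_eq_zero a p i hX, hrun_eq_zero a i p hX]
          simp
        · have hnc : ¬(x = i + 1 ∧ 1 ≤ y ∧ y ≤ p + 1) := by
            rintro ⟨h1, h2, h3⟩
            have : y ≠ p + 1 := fun he => hxy ⟨h1, he⟩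
            exact hc ⟨h1, h2, by omega⟩
          rw [if_neg hnc, if_neg hc]

theorem pvDpTable_eq (a : List String) (r c : Nat) :
    pvDpTable a r c = fun x y => dpSpec a r c x y := by
  unfold pvDpTable
  induction r with
  | zero =>
    funext x y
    simp only [List.range_zero, List.foldl_nil, dpSpec]
    rw [if_neg (by omega)]
  | succ m ih =>
    rw [List.range_succ, List.foldl_append, List.foldl_cons, List.foldl_nil, ih]
    funext x y
    rw [pvRow_fold a m c c (le_refl c) x y]
    by_cases h1 : x = m + 1 ∧ 1 ≤ y ∧ y ≤ c
    · rw [if_pos h1]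
      obtain ⟨rfl, hy1, hy2⟩ := h1
      simp only [dpSpec]
      rw [if_pos ⟨by omega, by omega, hy1, hy2⟩]
      simp
    · rw [if_neg h1]
      simp only [dpSpec]
      by_cases h2 : 1 ≤ x ∧ x ≤ m ∧ 1 ≤ y ∧ y ≤ c
      · rw [if_pos h2, if_pos ⟨h2.1, by omega, h2.2.2⟩]
      · rw [if_neg h2, if_neg (by rintro ⟨a1, a2, a3, a4⟩; exact h2 ⟨a1, by omega, a3, a4⟩)]

theorem check_iff (a : List String) (r c p q : Nat) (hp : p < r) (hq : q < c) (m : Int)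
    (h1 : 1 ≤ m) (hmv : m ≤ (vrun a q p : Int)) (hmh : m ≤ (hrun a p q : Int)) :
    ((dpSpec a r c (p + 1 - m.toNat + 1) (q + 1)).2 ≥ m ∧
      (dpSpec a r c (p + 1) (q + 1 - m.toNat + 1)).1 ≥ m) ↔ goodBR a p q m.toNat := by
  have hv := vrun_le a q p
  have hh := hrun_le a p q
  unfold dpSpec goodBR
  rw [if_pos (show 1 ≤ p + 1 - m.toNat + 1 ∧ p + 1 - m.toNat + 1 ≤ r ∧ 1 ≤ q + 1 ∧ q + 1 ≤ c by omega)]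
  rw [if_pos (show 1 ≤ p + 1 ∧ p + 1 ≤ r ∧ 1 ≤ q + 1 - m.toNat + 1 ∧ q + 1 - m.toNat + 1 ≤ c by omega)]
  have e1 : p + 1 - m.toNat + 1 - 1 = p - (m.toNat - 1) := by omega
  have e2 : q + 1 - 1 = q := by omega
  have e3 : p + 1 - 1 = p := by omega
  have e4 : q + 1 - m.toNat + 1 - 1 = q - (m.toNat - 1) := by omega
  rw [e1, e2, e3, e4]
  constructor
  · rintro ⟨c1, c2⟩
    refine ⟨by omega, by omega, by omega, by omega, by omega⟩
  · rintro ⟨g1, g2, g3, g4, g5⟩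
    exact ⟨by omega, by omega⟩

theorem cell_step (a : List String) (r c p q : Nat) (hp : p < r) (hq : q < c)
    (m acc : Int) (h0 : 0 ≤ acc)
    (hmv : m ≤ (vrun a q p : Int)) (hmh : m ≤ (hrun a p q : Int)) :
    acc ≤ pvWhile (fun x y => dpSpec a r c x y) (p + 1) (q + 1) m acc ∧
      (pvWhile (fun x y => dpSpec a r c x y) (p + 1) (q + 1) m acc = acc ∨
        (0 < pvWhile (fun x y => dpSpec a r c x y) (p + 1) (q + 1) m acc ∧
          goodBR a p q (pvWhile (fun x y => dpSpec a r c x y) (p + 1) (q + 1) m acc).toNat)) ∧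
      ∀ k : Nat, goodBR a p q k → (k : Int) ≤ m →
        (k : Int) ≤ pvWhile (fun x y => dpSpec a r c x y) (p + 1) (q + 1) m acc := by
  generalize hn : (m - acc).toNat = n
  induction n using Nat.strong_induction_on generalizing m with
  | _ n ih =>
    rw [pvWhile]
    by_cases hgt : m > acc
    · rw [if_pos hgt]
      by_cases hchk : (dpSpec a r c (p + 1 - m.toNat + 1) (q + 1)).2 ≥ m ∧
          (dpSpec a r c (p + 1) (q + 1 - m.toNat + 1)).1 ≥ m
      · rw [if_pos hchk]
        have hg : goodBR a p q m.toNat :=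
          (check_iff a r c p q hp hq m (by omega) hmv hmh).mp hchk
        exact ⟨by omega, Or.inr ⟨by omega, hg⟩, fun k _ hkm => by omega⟩
      · rw [if_neg hchk]
        obtain ⟨h1, h2, h3⟩ := ih (m - 1 - acc).toNat (by omega) (m - 1) (by omega) (by omega) rfl
        refine ⟨h1, h2, ?_⟩
        intro k hk hkm
        by_cases hkm' : (k : Int) ≤ m - 1
        · exact h3 k hk hkm'
        · exfalso
          apply hchk
          apply (check_iff a r c p q hp hq m (by omega) hmv hmh).mpr
          have : m.toNat = k := by omega
          rw [this]
          exact hk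
    · rw [if_neg hgt]
      exact ⟨by omega, Or.inl rfl, fun k _ hkm => by omega⟩

theorem inner_cells (a : List String) (r c : Nat) (i : Nat) (hi1 : 1 ≤ i) (hi2 : i ≤ r)
    (l : List Nat) (hl : ∀ j ∈ l, 1 ≤ j ∧ j ≤ c) :
    ∀ acc : Int, 0 ≤ acc → (acc = 0 ∨ GoodSq a r c acc.toNat) →
      0 ≤ (l.foldl (fun maximum j =>
            pvWhile (fun x y => dpSpec a r c x y) i j
              (min (dpSpec a r c i j).1 (dpSpec a r c i j).2) maximum) acc) ∧
      acc ≤ (l.foldl (fun maximum j =>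
            pvWhile (fun x y => dpSpec a r c x y) i j
              (min (dpSpec a r c i j).1 (dpSpec a r c i j).2) maximum) acc) ∧
      ((l.foldl (fun maximum j =>
            pvWhile (fun x y => dpSpec a r c x y) i j
              (min (dpSpec a r c i j).1 (dpSpec a r c i j).2) maximum) acc) = 0 ∨
        GoodSq a r c (l.foldl (fun maximum j =>
            pvWhile (fun x y => dpSpec a r c x y) i j
              (min (dpSpec a r c i j).1 (dpSpec a r c i j).2) maximum) acc).toNat) ∧
      ∀ q k : Nat, q + 1 ∈ l → goodBR a (i - 1) q k →
        (k : Int) ≤ (l.foldl (fun maximum j =>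
            pvWhile (fun x y => dpSpec a r c x y) i j
              (min (dpSpec a r c i j).1 (dpSpec a r c i j).2) maximum) acc) := by
  induction l with
  | nil =>
    intro acc h0 hg
    simp only [List.foldl_nil]
    exact ⟨h0, le_refl acc, hg, fun q k hq => absurd hq (List.not_mem_nil)⟩
  | cons j l ih =>
    intro acc h0 hg
    obtain ⟨hj1, hj2⟩ := hl j List.mem_cons_self
    have hl' : ∀ x ∈ l, 1 ≤ x ∧ x ≤ c := fun x hx => hl x (List.mem_cons_of_mem j hx)
    simp only [List.foldl_cons]
    have hik : i = (i - 1) + 1 := by omega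
    have hjk : j = (j - 1) + 1 := by omega
    have h1 : (dpSpec a r c i j).1 = ((vrun a (j - 1) (i - 1) : Nat) : Int) := by
      simp only [dpSpec]; rw [if_pos ⟨hi1, hi2, hj1, hj2⟩]
    have h2 : (dpSpec a r c i j).2 = ((hrun a (i - 1) (j - 1) : Nat) : Int) := by
      simp only [dpSpec]; rw [if_pos ⟨hi1, hi2, hj1, hj2⟩]
    have hstep := cell_step a r c (i - 1) (j - 1) (by omega) (by omega)
      (min (dpSpec a r c i j).1 (dpSpec a r c i j).2) acc h0
      (by rw [h1, h2]; exact min_le_left _ _) (by rw [h1, h2]; exact min_le_right _ _)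
    rw [← hik, ← hjk] at hstep
    obtain ⟨hs1, hs2, hs3⟩ := hstep
    have h0' : 0 ≤ pvWhile (fun x y => dpSpec a r c x y) i j
        (min (dpSpec a r c i j).1 (dpSpec a r c i j).2) acc := by omega
    have hg' : pvWhile (fun x y => dpSpec a r c x y) i j
          (min (dpSpec a r c i j).1 (dpSpec a r c i j).2) acc = 0 ∨
        GoodSq a r c (pvWhile (fun x y => dpSpec a r c x y) i j
          (min (dpSpec a r c i j).1 (dpSpec a r c i j).2) acc).toNat := by
      rcases hs2 with h | ⟨hpos, hgood⟩
      · rw [h]; exact hg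
      · exact Or.inr ⟨i - 1, by omega, j - 1, by omega, hgood⟩
    obtain ⟨t1, t2, t3, t4⟩ := ih hl' _ h0' hg'
    refine ⟨t1, by omega, t3, ?_⟩
    intro q k hq hgood
    rcases List.mem_cons.mp hq with he | hm
    · have hqj : q = j - 1 := by omega
      subst hqj
      have hkm : (k : Int) ≤ min (dpSpec a r c i j).1 (dpSpec a r c i j).2 := by
        rw [h1, h2]
        exact le_min (by exact_mod_cast hgood.2.1) (by exact_mod_cast hgood.2.2.1)
      have := hs3 k hgood hkm
      omega
    · exact t4 q k hm hgood

theorem outer_cells (a : List String) (r c : Nat)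
    (l : List Nat) (hl : ∀ x ∈ l, 1 ≤ x ∧ x ≤ r) :
    ∀ acc : Int, 0 ≤ acc → (acc = 0 ∨ GoodSq a r c acc.toNat) →
      0 ≤ (l.foldl (fun maximum i =>
            (pvDesc c).foldl (fun maximum j =>
              pvWhile (fun x y => dpSpec a r c x y) i j
                (min (dpSpec a r c i j).1 (dpSpec a r c i j).2) maximum) maximum) acc) ∧
      acc ≤ (l.foldl (fun maximum i =>
            (pvDesc c).foldl (fun maximum j =>
              pvWhile (fun x y => dpSpec a r c x y) i j
                (min (dpSpec a r c i j).1 (dpSpec a r c i j).2) maximum) maximum) acc) ∧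
      ((l.foldl (fun maximum i =>
            (pvDesc c).foldl (fun maximum j =>
              pvWhile (fun x y => dpSpec a r c x y) i j
                (min (dpSpec a r c i j).1 (dpSpec a r c i j).2) maximum) maximum) acc) = 0 ∨
        GoodSq a r c (l.foldl (fun maximum i =>
            (pvDesc c).foldl (fun maximum j =>
              pvWhile (fun x y => dpSpec a r c x y) i j
                (min (dpSpec a r c i j).1 (dpSpec a r c i j).2) maximum) maximum) acc).toNat) ∧
      ∀ p q k : Nat, p + 1 ∈ l → q < c → goodBR a p q k →
        (k : Int) ≤ (l.foldl (fun maximum i =>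
            (pvDesc c).foldl (fun maximum j =>
              pvWhile (fun x y => dpSpec a r c x y) i j
                (min (dpSpec a r c i j).1 (dpSpec a r c i j).2) maximum) maximum) acc) := by
  induction l with
  | nil =>
    intro acc h0 hg
    simp only [List.foldl_nil]
    exact ⟨h0, le_refl acc, hg, fun p q k hp => absurd hp (List.not_mem_nil)⟩
  | cons i l ih =>
    intro acc h0 hg
    obtain ⟨hi1, hi2⟩ := hl i List.mem_cons_self
    have hl' : ∀ x ∈ l, 1 ≤ x ∧ x ≤ r := fun x hx => hl x (List.mem_cons_of_mem i hx)
    simp only [List.foldl_cons]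
    have hdesc : ∀ j ∈ pvDesc c, 1 ≤ j ∧ j ≤ c := fun j hj => (mem_pvDesc c j).mp hj
    obtain ⟨r1, r2, r3, r4⟩ := inner_cells a r c i hi1 hi2 (pvDesc c) hdesc acc h0 hg
    obtain ⟨t1, t2, t3, t4⟩ := ih hl' _ r1 r3
    refine ⟨t1, by omega, t3, ?_⟩
    intro p q k hp hq hgood
    rcases List.mem_cons.mp hp with he | hm
    · have hpi : p = i - 1 := by omega
      subst hpi
      have hb := r4 q k ((mem_pvDesc c (q + 1)).mpr ⟨by omega, by omega⟩) hgood
      omega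
    · exact t4 p q k hm hq hgood

theorem A_isans (n : Int) (a : List String) :
    IsAns a a.length (a.headD "").length (largestSubsquare n a) := by
  have hmain : largestSubsquare n a =
      (pvDesc a.length).foldl (fun maximum i =>
        (pvDesc (a.headD "").length).foldl (fun maximum j =>
          pvWhile (fun x y => dpSpec a a.length (a.headD "").length x y) i j
            (min (dpSpec a a.length (a.headD "").length i j).1
              (dpSpec a a.length (a.headD "").length i j).2) maximum) maximum) 0 := by
    show (pvDesc a.length).foldl _ 0 = _
    rw [pvDpTable_eq]
  rw [hmain]
  obtain ⟨t1, _, t3, t4⟩ := outer_cells a a.length (a.headD "").length (pvDesc a.length)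
    (fun x hx => (mem_pvDesc a.length x).mp hx) 0 (le_refl 0) (Or.inl rfl)
  refine ⟨t1, t3, ?_⟩
  rintro k ⟨p, hp, q, hq, hgood⟩
  exact t4 p q k ((mem_pvDesc a.length (p + 1)).mpr ⟨by omega, by omega⟩) hq hgood

theorem border_iff (a : List String) (i j k : Nat) (hk : 1 ≤ k) :
    pvBorder a i j k = true ↔ goodBR a (i + k - 1) (j + k - 1) k := by
  have e1 : j + k - 1 - (k - 1) = j := by omega
  have e2 : i + k - 1 - (k - 1) = i := by omega
  unfold pvBorder goodBR
  rw [e1, e2]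
  simp only [Bool.and_eq_true, List.all_eq_true, List.mem_range]
  rw [vrun_iff, hrun_iff, vrun_iff, hrun_iff]
  constructor
  · rintro ⟨⟨⟨b1, b2⟩, b3⟩, b4⟩
    refine ⟨hk, ⟨by omega, ?_⟩, ⟨by omega, ?_⟩, ⟨by omega, ?_⟩, ⟨by omega, ?_⟩⟩
    · intro t ht
      have e : i + k - 1 - t = i + (k - 1 - t) := by omega
      rw [e]; exact b4 _ (by omega)
    · intro t ht
      have e : j + k - 1 - t = j + (k - 1 - t) := by omega
      rw [e]; exact b2 _ (by omega)
    · intro t ht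
      have e : i + k - 1 - t = i + (k - 1 - t) := by omega
      rw [e]; exact b3 _ (by omega)
    · intro t ht
      have e : j + k - 1 - t = j + (k - 1 - t) := by omega
      rw [e]; exact b1 _ (by omega)
  · rintro ⟨_, ⟨_, g2⟩, ⟨_, g3⟩, ⟨_, g4⟩, ⟨_, g5⟩⟩
    refine ⟨⟨⟨fun t ht => ?_, fun t ht => ?_⟩, fun t ht => ?_⟩, fun t ht => ?_⟩
    · have h := g5 (k - 1 - t) (by omega)
      have e : j + k - 1 - (k - 1 - t) = j + t := by omega
      rwa [e] at h
    · have h := g3 (k - 1 - t) (by omega)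
      have e : j + k - 1 - (k - 1 - t) = j + t := by omega
      rwa [e] at h
    · have h := g4 (k - 1 - t) (by omega)
      have e : i + k - 1 - (k - 1 - t) = i + t := by omega
      rwa [e] at h
    · have h := g2 (k - 1 - t) (by omega)
      have e : i + k - 1 - (k - 1 - t) = i + t := by omega
      rwa [e] at h

def anyGoodB (a : List String) (r c k : Nat) : Bool :=
  (List.range (r - k + 1)).any fun i => (List.range (c - k + 1)).any fun j => pvBorder a i j k

theorem goodBR_le (a : List String) (p q k : Nat) (h : goodBR a p q k) :
    k ≤ p + 1 ∧ k ≤ q + 1 :=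
  ⟨le_trans h.2.1 (vrun_le a q p), le_trans h.2.2.1 (hrun_le a p q)⟩

theorem anyGood_iff (a : List String) (r c k : Nat) (hk : 1 ≤ k) (hkr : k ≤ r) (hkc : k ≤ c) :
    anyGoodB a r c k = true ↔ GoodSq a r c k := by
  unfold anyGoodB GoodSq
  simp only [List.any_eq_true, List.mem_range]
  constructor
  · rintro ⟨i, hi, j, hj, hb⟩
    have hg := (border_iff a i j k hk).mp hb
    exact ⟨i + k - 1, by omega, j + k - 1, by omega, hg⟩
  · rintro ⟨p, hp, q, hq, hg⟩
    obtain ⟨hkp, hkq⟩ := goodBR_le a p q k hg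
    refine ⟨p - (k - 1), by omega, q - (k - 1), by omega, ?_⟩
    have e1 : p - (k - 1) + k - 1 = p := by omega
    have e2 : q - (k - 1) + k - 1 = q := by omega
    rw [border_iff a _ _ k hk, e1, e2]
    exact hg

theorem foldl_if_const (l : List Nat) (f : Nat → Bool) (v : Int) (acc : Int) :
    l.foldl (fun b x => if f x then v else b) acc = if l.any f then v else acc := by
  induction l generalizing acc with
  | nil => simp
  | cons x l ih =>
    simp only [List.foldl_cons, List.any_cons]
    rw [ih]
    by_cases h : f x = true
    · by_cases h2 : l.any f = true <;> simp [h, h2]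
    · by_cases h2 : l.any f = true <;> simp [h, h2]

theorem alt_inner_eq (a : List String) (r c k : Nat) (acc : Int) :
    (List.range (r - k + 1)).foldl (fun best i =>
        (List.range (c - k + 1)).foldl (fun best j =>
          if pvBorder a i j k then (k : Int) else best) best) acc =
      if anyGoodB a r c k then (k : Int) else acc := by
  have step : (List.range (r - k + 1)).foldl (fun best i =>
        (List.range (c - k + 1)).foldl (fun best j =>
          if pvBorder a i j k then (k : Int) else best) best) acc =
      (List.range (r - k + 1)).foldl (fun best i =>
        if (List.range (c - k + 1)).any (fun j => pvBorder a i j k) then (k : Int) else best) acc :=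
    PySem.List.foldl_congr_mem _ _ _ _ (fun b i _ => foldl_if_const _ _ _ _)
  rw [step, foldl_if_const]
  rfl

theorem alt_outer (a : List String) (r c : Nat) :
    ∀ m : Nat, m ≤ r → m ≤ c →
      0 ≤ ((List.range m).foldl (fun best k0 =>
            (List.range (r - (k0 + 1) + 1)).foldl (fun best i =>
              (List.range (c - (k0 + 1) + 1)).foldl (fun best j =>
                if pvBorder a i j (k0 + 1) then ((k0 + 1 : Nat) : Int) else best) best) best) 0) ∧
      (((List.range m).foldl (fun best k0 =>
            (List.range (r - (k0 + 1) + 1)).foldl (fun best i =>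
              (List.range (c - (k0 + 1) + 1)).foldl (fun best j =>
                if pvBorder a i j (k0 + 1) then ((k0 + 1 : Nat) : Int) else best) best) best) 0) = 0 ∨
        GoodSq a r c ((List.range m).foldl (fun best k0 =>
            (List.range (r - (k0 + 1) + 1)).foldl (fun best i =>
              (List.range (c - (k0 + 1) + 1)).foldl (fun best j =>
                if pvBorder a i j (k0 + 1) then ((k0 + 1 : Nat) : Int) else best) best) best) 0).toNat) ∧
      ∀ k : Nat, 1 ≤ k → k ≤ m → anyGoodB a r c k = true →
        (k : Int) ≤ ((List.range m).foldl (fun best k0 =>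
            (List.range (r - (k0 + 1) + 1)).foldl (fun best i =>
              (List.range (c - (k0 + 1) + 1)).foldl (fun best j =>
                if pvBorder a i j (k0 + 1) then ((k0 + 1 : Nat) : Int) else best) best) best) 0) := by
  intro m
  induction m with
  | zero =>
    intro _ _
    simp only [List.range_zero, List.foldl_nil]
    exact ⟨le_refl 0, Or.inl (by trivial), fun k hk1 hk2 => by omega⟩
  | succ m ih =>
    intro hmr hmc
    obtain ⟨t1, t2, t3⟩ := ih (by omega) (by omega)
    rw [List.range_succ, List.foldl_append, List.foldl_cons, List.foldl_nil]
    rw [alt_inner_eq a r c (m + 1)]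
    by_cases hany : anyGoodB a r c (m + 1) = true
    · rw [if_pos hany]
      have hg := (anyGood_iff a r c (m + 1) (by omega) hmr hmc).mp hany
      refine ⟨by omega, Or.inr ?_, ?_⟩
      · have e : ((m + 1 : Nat) : Int).toNat = m + 1 := by omega
        rw [e]; exact hg
      · intro k _ hk2 _
        exact_mod_cast by omega
    · rw [if_neg hany]
      refine ⟨t1, t2, ?_⟩
      intro k hk1 hk2 hk3
      rcases Nat.lt_or_ge k (m + 1) with h | h
      · exact t3 k hk1 (by omega) hk3
      · have : k = m + 1 := by omega
        rw [this] at hk3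
        exact absurd hk3 hany

theorem B_isans (n : Int) (a : List String) (ha : a ≠ []) :
    IsAns a a.length (a.headD "").length (largestSubsquare_alt n a) := by
  have hmain : largestSubsquare_alt n a =
      (List.range (min a.length (a.headD "").length)).foldl (fun best k0 =>
        (List.range (a.length - (k0 + 1) + 1)).foldl (fun best i =>
          (List.range ((a.headD "").length - (k0 + 1) + 1)).foldl (fun best j =>
            if pvBorder a i j (k0 + 1) then ((k0 + 1 : Nat) : Int) else best) best) best) 0 := by
    unfold largestSubsquare_alt
    rw [if_neg ha]
  rw [hmain]
  obtain ⟨t1, t2, t3⟩ := alt_outer a a.length (a.headD "").length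
    (min a.length (a.headD "").length) (min_le_left _ _) (min_le_right _ _)
  refine ⟨t1, t2, ?_⟩
  rintro k hk
  obtain ⟨p, hp, q, hq, hgood⟩ := hk
  obtain ⟨hkp, hkq⟩ := goodBR_le a p q k hgood
  have hk1 : 1 ≤ k := hgood.1
  have hany : anyGoodB a a.length (a.headD "").length k = true :=
    (anyGood_iff a a.length (a.headD "").length k hk1 (by omega) (by omega)).mpr
      ⟨p, hp, q, hq, hgood⟩
  exact t3 k hk1 (by omega) hany

-- ===== VERDICT (by name: the statement is the Claim_ definition above) =====
theorem largestSubsquare_spec : Claim_equal_largestSubsquare := by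
  intro n a _ hpre
  unfold Spec_largestSubsquare
  exact IsAns_unique a a.length (a.headD "").length _ _ (A_isans n a) (B_isans n a hpre.1)
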